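-- pv_equiv track=rewrite | github.com/JustaLiang/island-bot | IslandyBot.py | cloth_check
-- ===== SOURCE A (Python) =====
-- def cloth_check(cloth):
--     valid = ""
--     remain = ""
--     for f in cloth:
--         if f not in valid:
--             valid += f
--         else:
--             remain += f
--     if len(valid) >= 5:
--         return True, remain
--     else:
--         return False, cloth
-- ===== SOURCE B (Python) =====
-- def cloth_check(cloth):
--     distinct = "".join(dict.fromkeys(cloth))
--     if len(distinct) >= 5:
--         rest = list(cloth)
--         for ch in distinct:
--             rest.remove(ch)
--         return True, "".join(rest)
--     return False, cloth
-- ===== Notes on version B (the rewrite author's own statement) =====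
-- stated objective: alternative
-- what changed: Instead of one pass accumulating both the seen-set and the duplicates string, B first extracts the distinct characters in first-appearance order via dict.fromkeys, and only on the >=5 branch reconstructs the remainder by deleting the first occurrence of each distinct character from a list copy of the input.
import Mathlib
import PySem

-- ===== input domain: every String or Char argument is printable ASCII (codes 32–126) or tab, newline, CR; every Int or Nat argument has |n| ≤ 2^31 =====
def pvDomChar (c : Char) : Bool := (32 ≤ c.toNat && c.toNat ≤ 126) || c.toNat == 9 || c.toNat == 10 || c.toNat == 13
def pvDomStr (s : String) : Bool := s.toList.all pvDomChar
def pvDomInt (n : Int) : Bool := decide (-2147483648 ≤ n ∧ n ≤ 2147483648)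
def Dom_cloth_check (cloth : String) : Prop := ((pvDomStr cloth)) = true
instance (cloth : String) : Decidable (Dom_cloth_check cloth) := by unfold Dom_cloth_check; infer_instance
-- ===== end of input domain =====

-- B extracts the distinct chars first (first-appearance order) and, only when flagged,
-- rebuilds the remainder by removing each distinct char's first occurrence; alternative decomposition, same cost.


-- ===== PORT A =====
-- single pass over the string: firsts go to `valid`, repeats to `remain` (strings ported as List Char, exact on ASCII)
def cloth_check (cloth : String) : Bool × String :=
  let vr := cloth.toList.foldl
    (fun (vr : List Char × List Char) f =>
      if ¬ (f ∈ vr.1) then (vr.1 ++ [f], vr.2) else (vr.1, vr.2 ++ [f]))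
    ([], [])
  if vr.1.length ≥ 5 then (true, String.ofList vr.2) else (false, cloth)

-- ===== PORT B =====
-- dict.fromkeys(cloth) keeps first-appearance order: ported as the insertion fold over the keys
-- list.remove strips the first occurrence: PySem.List.remove?; it never fails here (each distinct char occurs), getD is the no-op fallback
def cloth_check_alt (cloth : String) : Bool × String :=
  let distinct := cloth.toList.foldl (fun acc c => if c ∈ acc then acc else acc ++ [c]) []
  if distinct.length ≥ 5 then
    let rest := distinct.foldl (fun l ch => (PySem.List.remove? l ch).getD l) cloth.toList
    (true, String.ofList rest)
  else (false, cloth)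

-- ===== PRECONDITION & SPEC =====
def Spec_cloth_check (cloth : String) (out : Bool × String) : Prop := out = cloth_check_alt cloth
instance (cloth : String) (out : Bool × String) : Decidable (Spec_cloth_check cloth out) := by unfold Spec_cloth_check; infer_instance

-- ===== CLAIM (what is proved, stated in full; the proofs are below) =====
def Claim_equal_cloth_check : Prop := ∀ (cloth : String), Dom_cloth_check cloth → Spec_cloth_check cloth (cloth_check cloth)

-- ===== LEMMAS AND PROOFS =====

-- the new distinct chars of cs given already-seen v
def pvDNew (v : List Char) : List Char → List Char
  | [] => []
  | c :: t => if c ∈ v then pvDNew v t else c :: pvDNew (v ++ [c]) t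

-- the repeated chars of cs given already-seen v
def pvDups (v : List Char) : List Char → List Char
  | [] => []
  | c :: t => if c ∈ v then c :: pvDups v t else pvDups (v ++ [c]) t

theorem pvLoopA (cs v r : List Char) :
    cs.foldl (fun (vr : List Char × List Char) f =>
      if ¬ (f ∈ vr.1) then (vr.1 ++ [f], vr.2) else (vr.1, vr.2 ++ [f])) (v, r)
    = (v ++ pvDNew v cs, r ++ pvDups v cs) := by
  induction cs generalizing v r with
  | nil => simp [pvDNew, pvDups]
  | cons c t ih =>
    simp only [List.foldl_cons]
    by_cases h : c ∈ v
    · rw [if_neg (by simp [h]), ih]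
      simp [pvDNew, pvDups, h]
    · rw [if_pos (by simp [h]), ih]
      simp [pvDNew, pvDups, h]

theorem pvDistinctB (cs acc : List Char) :
    cs.foldl (fun acc c => if c ∈ acc then acc else acc ++ [c]) acc = acc ++ pvDNew acc cs := by
  induction cs generalizing acc with
  | nil => simp [pvDNew]
  | cons c t ih =>
    by_cases h : c ∈ acc <;> simp [pvDNew, h, ih]

theorem pvDNew_not_mem (cs : List Char) (v : List Char) (c : Char)
    (h : c ∈ pvDNew v cs) : c ∉ v := by
  induction cs generalizing v with
  | nil => simp [pvDNew] at h
  | cons c' t ih =>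
    by_cases hm : c' ∈ v
    · exact ih v (by simpa [pvDNew, hm] using h)
    · simp only [pvDNew, if_neg hm] at h
      rcases List.mem_cons.mp h with hc | h'
      · subst hc; exact hm
      · intro hc; exact ih (v ++ [c']) h' (List.mem_append_left _ hc)

def pvRmv (l : List Char) (d : Char) : List Char := (PySem.List.remove? l d).getD l

theorem pvRmv_cons (c : Char) (t : List Char) (d : Char) :
    pvRmv (c :: t) d = if c = d then t else c :: pvRmv t d := by
  by_cases h : c = d
  · subst h; simp [pvRmv, PySem.List.remove?_cons_self]
  · rw [if_neg h]
    simp only [pvRmv, PySem.List.remove?_cons_of_ne t h]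
    cases PySem.List.remove? t d <;> simp

theorem pvFoldl_rmv_skip (D : List Char) (c : Char) (t : List Char) (h : c ∉ D) :
    D.foldl pvRmv (c :: t) = c :: D.foldl pvRmv t := by
  induction D generalizing t with
  | nil => simp
  | cons d D' ih =>
    have hne : c ≠ d := by intro hc; exact h (by simp [hc])
    simp only [List.foldl_cons, pvRmv_cons, if_neg hne]
    exact ih _ (fun hm => h (by simp [hm]))

theorem pvMain (cs v : List Char) :
    (pvDNew v cs).foldl pvRmv cs = pvDups v cs := by
  induction cs generalizing v with
  | nil => simp [pvDNew, pvDups]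
  | cons c t ih =>
    by_cases h : c ∈ v
    · simp only [pvDNew, pvDups, if_pos h]
      rw [pvFoldl_rmv_skip _ c t (fun hm => pvDNew_not_mem t v c hm h), ih v]
    · simp only [pvDNew, pvDups, if_neg h, List.foldl_cons, pvRmv_cons, ite_true]
      exact ih (v ++ [c])

-- ===== VERDICT (by name: the statement is the Claim_ definition above) =====
theorem cloth_check_spec : Claim_equal_cloth_check := by
  intro cloth _
  show cloth_check cloth = cloth_check_alt cloth
  unfold cloth_check cloth_check_alt
  rw [pvLoopA, pvDistinctB]
  simp only [List.nil_append]
  have hfold : (pvDNew [] cloth.toList).foldl (fun l ch => (PySem.List.remove? l ch).getD l) cloth.toList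
      = pvDups [] cloth.toList := pvMain cloth.toList []
  by_cases h : (pvDNew [] cloth.toList).length ≥ 5 <;> simp [h, hfold]
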